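-- pv_equiv track=rewrite | github.com/19127467/Project02-ColoringPuzzle | utils.py | Test_result
-- ===== SOURCE A (Python) =====
-- from typing import List, Set, Dict, Tuple, Optional, Any
--
-- def Test_result(m: int, n: int, puzzle: List[int], result: List[int]):
--     for row in range(m):
--         for col in range(n):
--             if (puzzle[row][col] >= 0 and puzzle[row][col] <= 9):
--                 count_green, right_green = 0, int(puzzle[row][col])
--                 for i in range(row - 1, row + 2):
--                     if (i >= 0 and i < m):
--                         for j in range(col - 1, col + 2):
--                             if (j >= 0 and j < n):
--                                 if(result[i][j] == 1):
--                                     count_green += 1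
--                 if (right_green != count_green):
--                     return False
--     return True
-- ===== SOURCE B (Python) =====
-- from typing import List, Set, Dict, Tuple, Optional, Any
--
-- def Test_result(m: int, n: int, puzzle: List[int], result: List[int]):
--     # Per-row prefix sums of green cells; each numbered cell's neighborhood
--     # count is then a sum of <=3 prefix differences (no inner 3x3 scan).
--     P = []
--     for i in range(m):
--         acc = [0]
--         s = 0
--         for j in range(n):
--             s += 1 if result[i][j] == 1 else 0
--             acc.append(s)
--         P.append(acc)
--     for row in range(m):
--         for col in range(n):
--             v = puzzle[row][col]
--             if 0 <= v <= 9: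
--                 lo, hi = max(0, col - 1), min(n, col + 2)
--                 cnt = 0
--                 for i in range(max(0, row - 1), min(m, row + 2)):
--                     cnt += P[i][hi] - P[i][lo]
--                 if int(v) != cnt:
--                     return False
--     return True
-- ===== Notes on version B (the rewrite author's own statement) =====
-- stated objective: alternative
-- what changed: B precomputes per-row prefix sums of green cells once and evaluates each numbered cell's neighborhood count as at most three clamped prefix-sum differences, replacing A's per-cell 3x3 guarded double scan.
-- outside the precondition, e.g. on Test_result(1, 1, [[10]], []): A returns True, B raises IndexError
import Mathlib
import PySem

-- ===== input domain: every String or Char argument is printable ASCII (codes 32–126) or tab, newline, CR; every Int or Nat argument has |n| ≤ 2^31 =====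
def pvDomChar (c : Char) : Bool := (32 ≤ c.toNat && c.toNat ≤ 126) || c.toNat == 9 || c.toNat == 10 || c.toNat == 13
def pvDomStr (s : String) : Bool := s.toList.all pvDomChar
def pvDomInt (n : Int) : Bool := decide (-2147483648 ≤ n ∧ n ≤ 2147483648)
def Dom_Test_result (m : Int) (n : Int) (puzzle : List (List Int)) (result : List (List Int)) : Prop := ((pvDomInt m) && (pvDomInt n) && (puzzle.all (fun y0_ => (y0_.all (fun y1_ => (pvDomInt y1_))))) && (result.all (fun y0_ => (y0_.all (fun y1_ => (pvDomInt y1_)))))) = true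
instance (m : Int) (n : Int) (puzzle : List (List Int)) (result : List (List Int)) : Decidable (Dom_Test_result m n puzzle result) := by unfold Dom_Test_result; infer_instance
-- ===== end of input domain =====

-- B replaces A's guarded 3x3 scan per numbered cell by per-row prefix sums queried
-- through clamped prefix differences (objective: alternative decomposition, same asymptotics).

-- ===== PORT A =====
-- g[i][j]; every read both ports perform is guard-protected (indices in range under Pre_),
-- so the defaults never influence the result there.
def pvCell (g : List (List Int)) (i j : Int) : Int :=
  PySem.List.pyGetD (PySem.List.pyGetD g i []) j 0

def Test_result (m : Int) (n : Int) (puzzle : List (List Int)) (result : List (List Int)) : Bool :=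
  (PySem.List.pyRange 0 m).all (fun row =>
    (PySem.List.pyRange 0 n).all (fun col =>
      if 0 ≤ pvCell puzzle row col ∧ pvCell puzzle row col ≤ 9 then
        decide (pvCell puzzle row col =
          (PySem.List.pyRange (row - 1) (row + 2)).foldl (fun acc i =>
            if 0 ≤ i ∧ i < m then
              (PySem.List.pyRange (col - 1) (col + 2)).foldl (fun acc2 j =>
                if 0 ≤ j ∧ j < n then
                  if pvCell result i j == 1 then acc2 + 1 else acc2
                else acc2) acc
            else acc) 0)
      else true))

-- ===== PORT B =====
-- prefix sums of one row of result: [0, s_1, ..., s_n]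
def pvPrefRow (n : Int) (r : List Int) : List Int :=
  ((PySem.List.pyRange 0 n).foldl (fun (st : List Int × Int) j =>
    let s := st.2 + (if PySem.List.pyGetD r j 0 == 1 then 1 else 0)
    (st.1 ++ [s], s)) ([0], 0)).1

def Test_result_alt (m : Int) (n : Int) (puzzle : List (List Int)) (result : List (List Int)) : Bool :=
  let P := (PySem.List.pyRange 0 m).map (fun i => pvPrefRow n (PySem.List.pyGetD result i []))
  (PySem.List.pyRange 0 m).all (fun row =>
    (PySem.List.pyRange 0 n).all (fun col =>
      if 0 ≤ pvCell puzzle row col ∧ pvCell puzzle row col ≤ 9 then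
        decide (pvCell puzzle row col =
          (PySem.List.pyRange (max 0 (row - 1)) (min m (row + 2))).foldl
            (fun acc i => acc + (pvCell P i (min n (col + 2)) - pvCell P i (max 0 (col - 1)))) 0)
      else true))

-- ===== PRECONDITION & SPEC =====
-- Pre_ restricts to well-formed m×n grids (when 0 < m and 0 < n, puzzle and result have at
-- least m rows and their first m rows have at least n entries): outside it A raises
-- IndexError at the first out-of-range access it reaches, or returns a value only because
-- its scan never touches the ragged region of result, where B's full prefix pass raises.
def Pre_Test_result (m : Int) (n : Int) (puzzle : List (List Int)) (result : List (List Int)) : Prop :=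
  (0 < m ∧ 0 < n) →
    (m ≤ puzzle.length ∧ m ≤ result.length ∧
     (∀ r ∈ puzzle.take m.toNat, n ≤ r.length) ∧
     (∀ r ∈ result.take m.toNat, n ≤ r.length))
instance (m : Int) (n : Int) (puzzle : List (List Int)) (result : List (List Int)) : Decidable (Pre_Test_result m n puzzle result) := by unfold Pre_Test_result; infer_instance

def pvWitness_Test_result : Int × Int × List (List Int) × List (List Int) := (1, 1, [[1]], [[1]])

def Spec_Test_result (m : Int) (n : Int) (puzzle : List (List Int)) (result : List (List Int)) (out : Bool) : Prop := out = Test_result_alt m n puzzle result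
instance (m : Int) (n : Int) (puzzle : List (List Int)) (result : List (List Int)) (out : Bool) : Decidable (Spec_Test_result m n puzzle result out) := by unfold Spec_Test_result; infer_instance

-- ===== CLAIM (what is proved, stated in full; the proofs are below) =====
def Claim_equal_Test_result : Prop := ∀ (m : Int) (n : Int) (puzzle : List (List Int)) (result : List (List Int)), Dom_Test_result m n puzzle result → Pre_Test_result m n puzzle result → Spec_Test_result m n puzzle result (Test_result m n puzzle result)

-- ===== LEMMAS AND PROOFS =====

-- clamping a guarded range: the guard 0 ≤ x < n filters pyRange a b down to pyRange (max 0 a) (min n b)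
theorem pv_filter_pyRange (a b n : Int) :
    (PySem.List.pyRange a b).filter (fun x => decide (0 ≤ x ∧ x < n)) =
      PySem.List.pyRange (max 0 a) (min n b) := by
  by_cases hab : b ≤ a
  · rw [PySem.List.pyRange_one_eq_nil hab, PySem.List.pyRange_one_eq_nil (by omega)]
    rfl
  · rw [not_le] at hab
    obtain ⟨k, hk⟩ : ∃ k : Nat, b - a = (k : Int) := ⟨(b - a).toNat, by omega⟩
    induction k generalizing a with
    | zero => omega
    | succ k ih =>
      rw [PySem.List.pyRange_one_cons hab, List.filter_cons]
      by_cases ha : 0 ≤ a ∧ a < n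
      · rw [if_pos (by simpa using ha)]
        by_cases h2 : a + 1 < b
        · rw [ih (a + 1) h2 (by omega)]
          rw [PySem.List.pyRange_one_cons (a := max 0 a) (by omega)]
          congr 1
          · omega
          · congr 1; omega
        · rw [PySem.List.pyRange_one_eq_nil (by omega : b ≤ a + 1)]
          rw [PySem.List.pyRange_one_cons (a := max 0 a) (by omega)]
          rw [PySem.List.pyRange_one_eq_nil (by omega)]
          simp; omega
      · rw [if_neg (by simpa using ha)]
        by_cases h2 : a + 1 < b
        · rw [ih (a + 1) h2 (by omega)]
          by_cases h3 : a < 0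
          · rw [show max 0 (a + 1) = max 0 a by omega]
          · rw [PySem.List.pyRange_one_eq_nil (by omega), PySem.List.pyRange_one_eq_nil (by omega)]
        · rw [PySem.List.pyRange_one_eq_nil (by omega : b ≤ a + 1)]
          rw [PySem.List.pyRange_one_eq_nil (by omega)]
          simp

-- splitting pyRange 0 hi at lo
theorem pv_pyRange_split (lo hi : Int) (h0 : 0 ≤ lo) (h : lo ≤ hi) :
    PySem.List.pyRange 0 hi = PySem.List.pyRange 0 lo ++ PySem.List.pyRange lo hi := by
  obtain ⟨k, hk⟩ : ∃ k : Nat, hi - lo = (k : Int) := ⟨(hi - lo).toNat, by omega⟩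
  induction k generalizing hi with
  | zero =>
    have : hi = lo := by omega
    subst this
    simp [PySem.List.pyRange_one_eq_nil le_rfl]
  | succ k ih =>
    have := ih (hi - 1) (by omega) (by omega)
    have e1 : hi = (hi - 1) + 1 := by omega
    rw [e1, PySem.List.pyRange_one_succ_right (by omega), PySem.List.pyRange_one_succ_right (by omega),
        this, List.append_assoc]

-- the prefix fold computes the list of column-prefix green counts (and carries the last one)
theorem pv_pref_fold (r : List Int) (N : Nat) :
    (PySem.List.pyRange 0 (N : Int)).foldl (fun (st : List Int × Int) j =>
        let s := st.2 + (if PySem.List.pyGetD r j 0 == 1 then 1 else 0)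
        (st.1 ++ [s], s)) ([0], 0) =
      ((PySem.List.pyRange 0 ((N : Int) + 1)).map
          (fun k => (((PySem.List.pyRange 0 k).countP (fun j => PySem.List.pyGetD r j 0 == 1) : Nat) : Int)),
        (((PySem.List.pyRange 0 (N : Int)).countP (fun j => PySem.List.pyGetD r j 0 == 1) : Nat) : Int)) := by
  induction N with
  | zero =>
    simp only [Nat.cast_zero]
    rw [PySem.List.pyRange_one_eq_nil le_rfl, PySem.List.pyRange_one_succ_right le_rfl,
        PySem.List.pyRange_one_eq_nil le_rfl]
    simp [PySem.List.pyRange_one_eq_nil le_rfl]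
  | succ N ih =>
    have h0N : (0 : Int) ≤ (N : Int) := by positivity
    have hc : ((N + 1 : Nat) : Int) = (N : Int) + 1 := by push_cast; ring
    rw [hc, PySem.List.pyRange_one_succ_right h0N, List.foldl_append, ih]
    rw [PySem.List.pyRange_one_succ_right (by omega : (0 : Int) ≤ (N : Int) + 1)]
    simp only [List.foldl_cons, List.foldl_nil, Prod.mk.injEq]
    constructor
    · rw [List.map_append, PySem.List.pyRange_one_succ_right h0N]
      simp only [List.map_append, List.map_cons, List.map_nil]
      congr 1
      rw [PySem.List.pyRange_one_succ_right h0N, List.countP_append]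
      simp [List.countP_cons, apply_ite]
    · rw [List.countP_append]
      simp [List.countP_cons, apply_ite]

theorem pv_prefRow_get (n k : Int) (r : List Int) (hn : 0 ≤ n) (hk : 0 ≤ k) (hkn : k ≤ n) :
    PySem.List.pyGetD (pvPrefRow n r) k 0 =
      (((PySem.List.pyRange 0 k).countP (fun j => PySem.List.pyGetD r j 0 == 1) : Nat) : Int) := by
  have hn' : n = ((n.toNat : Nat) : Int) := by omega
  unfold pvPrefRow
  rw [hn', pv_pref_fold r n.toNat]
  have e : ((n.toNat : Nat) : Int) + 1 = ((n.toNat + 1 : Nat) : Int) := by push_cast; ring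
  have hkk : k = ((k.toNat : Nat) : Int) := by omega
  rw [e, hkk, PySem.List.pyGetD_map_pyRange _ (n.toNat + 1) k.toNat 0 (by omega), ← hkk]

theorem pv_all_congr_mem {α : Type} (l : List α) (p q : α → Bool)
    (h : ∀ x ∈ l, p x = q x) : l.all p = l.all q := by
  induction l with
  | nil => rfl
  | cons x t ih =>
    simp only [List.all_cons, h x (by simp), ih (fun y hy => h y (by simp [hy]))]

-- per-cell equality: A's guarded 3x3 scan equals B's sum of clamped prefix differences
theorem pv_count_eq (m n row col : Int) (result : List (List Int))
    (hr : 0 ≤ row ∧ row < m) (hc : 0 ≤ col ∧ col < n) :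
    ((PySem.List.pyRange (row - 1) (row + 2)).foldl (fun acc i =>
        if 0 ≤ i ∧ i < m then
          (PySem.List.pyRange (col - 1) (col + 2)).foldl (fun acc2 j =>
            if 0 ≤ j ∧ j < n then
              if pvCell result i j == 1 then acc2 + 1 else acc2
            else acc2) acc
        else acc) 0) =
    ((PySem.List.pyRange (max 0 (row - 1)) (min m (row + 2))).foldl
        (fun acc i => acc +
          (pvCell ((PySem.List.pyRange 0 m).map (fun i => pvPrefRow n (PySem.List.pyGetD result i []))) i (min n (col + 2)) -
           pvCell ((PySem.List.pyRange 0 m).map (fun i => pvPrefRow n (PySem.List.pyGetD result i []))) i (max 0 (col - 1)))) 0) := by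
  rw [PySem.List.foldl_ite_eq_foldl_filter (p := fun i => 0 ≤ i ∧ i < m), pv_filter_pyRange]
  refine PySem.List.foldl_congr_mem _ _ _ _ (fun acc i hi => ?_)
  rw [PySem.List.mem_pyRange_one] at hi
  rw [PySem.List.foldl_ite_eq_foldl_filter (p := fun j => 0 ≤ j ∧ j < n), pv_filter_pyRange,
      PySem.List.foldl_if_add_one (p := fun j => pvCell result i j == 1)]
  have hP : ∀ k : Int, 0 ≤ k → k ≤ n →
      pvCell ((PySem.List.pyRange 0 m).map (fun i => pvPrefRow n (PySem.List.pyGetD result i []))) i k =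
      (((PySem.List.pyRange 0 k).countP (fun j => PySem.List.pyGetD (PySem.List.pyGetD result i []) j 0 == 1) : Nat) : Int) := by
    intro k hk0 hkn
    show PySem.List.pyGetD (PySem.List.pyGetD ((PySem.List.pyRange 0 m).map (fun i => pvPrefRow n (PySem.List.pyGetD result i []))) i []) k 0 = _
    have hm : m = ((m.toNat : Nat) : Int) := by omega
    have hii : i = ((i.toNat : Nat) : Int) := by omega
    rw [hm, hii, PySem.List.pyGetD_map_pyRange _ m.toNat i.toNat [] (by omega), ← hii]
    exact pv_prefRow_get n k _ (by omega) hk0 hkn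
  have hlo : (0 : Int) ≤ max 0 (col - 1) := le_max_left _ _
  have hhi : max 0 (col - 1) ≤ min n (col + 2) := by omega
  rw [hP _ hlo (by omega), hP _ (by omega) (by omega)]
  rw [pv_pyRange_split (max 0 (col - 1)) (min n (col + 2)) hlo hhi, List.countP_append]
  have hq : List.countP (fun j => pvCell result i j == 1)
      (PySem.List.pyRange (max 0 (col - 1)) (min n (col + 2))) =
      List.countP (fun j => PySem.List.pyGetD (PySem.List.pyGetD result i []) j 0 == 1)
      (PySem.List.pyRange (max 0 (col - 1)) (min n (col + 2))) :=
    List.countP_congr (fun x _ => by simp [pvCell])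
  rw [hq]
  push_cast
  ring

-- ===== VERDICT (by name: the statement is the Claim_ definition above) =====
theorem Test_result_spec : Claim_equal_Test_result := by
  intro m n puzzle result _ _
  unfold Spec_Test_result Test_result Test_result_alt
  refine pv_all_congr_mem _ _ _ (fun row hrow => ?_)
  refine pv_all_congr_mem _ _ _ (fun col hcol => ?_)
  rw [PySem.List.mem_pyRange_one] at hrow hcol
  by_cases h : 0 ≤ pvCell puzzle row col ∧ pvCell puzzle row col ≤ 9
  · simp only [if_pos h]
    rw [pv_count_eq m n row col result hrow hcol]
  · simp only [if_neg h]
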